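-- pv_equiv track=rewrite | github.com/paulklemstine/factor | website/papers/photon_network_exploration.py | build_photon_network
-- ===== SOURCE A (Python) =====
-- from math import gcd, isqrt
--
-- def gaussian_multiply(z1, z2):
--     """Multiply two Gaussian integers (a1+b1i)(a2+b2i)."""
--     a1, b1 = z1
--     a2, b2 = z2
--     return (a1*a2 - b1*b2, a1*b2 + b1*a2)
--
-- def gaussian_conjugate(z):
--     """Conjugate of a+bi is a-bi."""
--     return (z[0], -z[1])
--
-- def normalize_gaussian(z):
--     """Normalize to canonical form (multiply by unit to get first quadrant)."""
--     a, b = z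
--     # Units are 1, -1, i, -i
--     candidates = [(a, b), (-a, -b), (-b, a), (b, -a)]
--     # Choose lexicographically largest with both non-negative
--     best = None
--     for c in candidates:
--         if c[0] >= 0 and c[1] >= 0:
--             if best is None or c > best:
--                 best = c
--     if best is None:
--         return min(candidates)  # fallback
--     return best
--
-- def build_photon_network(n):
--     """
--     Build the photon network of n.
--
--     Vertices: All Gaussian integers z = a+bi with |z|² = n (up to units).
--
--     Edges: z1 ~ z2 if there exists a Gaussian integer w with |w|² being
--     a prime p dividing n, such that z1 = w * z2/w' (i.e., related by
--     changing one Gaussian prime factor's conjugate choice).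
--     """
--     # Find all Gaussian integers with norm n (all quadrants, then normalize)
--     all_z = []
--     for a in range(-isqrt(n)-1, isqrt(n)+2):
--         for b in range(-isqrt(n)-1, isqrt(n)+2):
--             if a*a + b*b == n:
--                 all_z.append((a, b))
--
--     # Normalize to first quadrant representatives
--     normalized = set()
--     for z in all_z:
--         nz = normalize_gaussian(z)
--         normalized.add(nz)
--
--     vertices = sorted(normalized)
--
--     # Build edges: two vertices are connected if they share all but one
--     # Gaussian prime factor (i.e., differ by conjugating one factor)
--     # Practical check: z1 * conj(z2) has norm n, and z1/z2 in Gaussian integers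
--     edges = []
--     for i, z1 in enumerate(vertices):
--         for j, z2 in enumerate(vertices):
--             if i < j:
--                 # Check if z1 * conj(z2) gives something meaningful
--                 z2c = gaussian_conjugate(z2)
--                 prod = gaussian_multiply(z1, z2c)
--                 # The product has norm n²/n² = ... no, |z1|² = |z2|² = n
--                 # |z1 * conj(z2)|² = n * n = n²
--                 # They're related if the "rotation" z1/z2 is a Gaussian integer
--                 # z1 * conj(z2) / n should be a Gaussian integer (or unit)
--                 if n > 0 and prod[0] % n == 0 and prod[1] % n == 0:
--                     edges.append((z1, z2))
--
--     return vertices, edges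
-- ===== SOURCE B (Python) =====
-- from math import isqrt
--
-- def build_photon_network(n):
--     # Vertices: one representative (a, b), a >= 1, b >= 0, per unit class of
--     # norm n, found by scanning a = 1..isqrt(n) and testing whether n - a*a is
--     # a perfect square; edges by scanning each suffix of the vertex list.
--     r = isqrt(n)
--     vertices = []
--     if n == 0:
--         vertices.append((0, 0))
--     for a in range(1, r + 1):
--         b2 = n - a * a
--         b = isqrt(b2)
--         if b * b == b2:
--             vertices.append((a, b))
--     edges = []
--     for i, z1 in enumerate(vertices):
--         a, b = z1
--         for z2 in vertices[i + 1:]: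
--             c, d = z2
--             if (a * c + b * d) % n == 0 and (b * c - a * d) % n == 0:
--                 edges.append((z1, z2))
--     return vertices, edges
-- ===== Notes on version B (the rewrite author's own statement) =====
-- stated objective: faster
-- what changed: B finds the norm-n Gaussian integers by scanning a = 1..isqrt(n) and testing n - a*a for a perfect square with isqrt, emitting the canonical first-quadrant representative directly in sorted order (A scans the full ~(2*sqrt(n)+3)^2 grid, normalizes every hit through unit rotations, deduplicates into a set and sorts), and builds edges by iterating each suffix vertices[i+1:] with the Gaussian product arithmetic inlined.
import Mathlib
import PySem

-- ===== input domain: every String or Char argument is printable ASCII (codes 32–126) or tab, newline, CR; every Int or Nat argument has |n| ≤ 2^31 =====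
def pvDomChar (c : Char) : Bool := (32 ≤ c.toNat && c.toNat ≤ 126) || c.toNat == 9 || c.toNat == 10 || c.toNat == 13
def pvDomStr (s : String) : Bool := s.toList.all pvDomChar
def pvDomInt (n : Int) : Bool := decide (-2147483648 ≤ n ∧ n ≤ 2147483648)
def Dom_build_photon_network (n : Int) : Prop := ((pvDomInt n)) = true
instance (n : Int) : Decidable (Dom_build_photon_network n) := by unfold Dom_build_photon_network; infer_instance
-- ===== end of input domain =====

-- B replaces A's O(n) full-grid scan for the norm-n Gaussian integers by an O(√n) scan
-- a = 1..isqrt(n) testing n - a² for a perfect square (emitting the canonical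
-- representatives directly, already sorted), and builds edges over each suffix.

-- ===== PORT A =====

-- math.isqrt m for m ≥ 0 is exactly Nat.sqrt (ValueError for m < 0 is excluded by Pre_)
def pvIsqrt (m : Int) : Int := (Nat.sqrt m.toNat : Int)

def gaussian_multiply (z1 z2 : Int × Int) : Int × Int :=
  (z1.1 * z2.1 - z1.2 * z2.2, z1.1 * z2.2 + z1.2 * z2.1)

def gaussian_conjugate (z : Int × Int) : Int × Int := (z.1, -z.2)

def normalize_gaussian (z : Int × Int) : Int × Int :=
  let a := z.1
  let b := z.2
  let candidates : List (Int × Int) := [(a, b), (-a, -b), (-b, a), (b, -a)]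
  let best : Option (Int × Int) := candidates.foldl (fun best c =>
      if 0 ≤ c.1 ∧ 0 ≤ c.2 then
        match best with
        | none => some c                         -- best is None
        | some v => if v.1 < c.1 ∨ (v.1 = c.1 ∧ v.2 < c.2) then some c else some v  -- c > best (tuple order)
      else best) none
  match best with
  | some v => v
  | none => (PySem.List.min2? candidates Prod.fst Prod.snd).getD (0, 0)  -- min(candidates); candidates ≠ [] so the default is unreachable

def pvAllZ (n : Int) : List (Int × Int) :=
  (PySem.List.pyRange (-(pvIsqrt n) - 1) (pvIsqrt n + 2) 1).foldl (fun acc a =>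
    (PySem.List.pyRange (-(pvIsqrt n) - 1) (pvIsqrt n + 2) 1).foldl (fun acc b =>
      if a * a + b * b = n then acc ++ [(a, b)] else acc) acc) []

def pvNormalized (n : Int) : PySem.Set (Int × Int) :=
  (pvAllZ n).foldl (fun s z => PySem.Set.add s (normalize_gaussian z)) PySem.Set.empty

def pvVerticesA (n : Int) : List (Int × Int) :=
  PySem.List.sorted2 (pvNormalized n) Prod.fst Prod.snd

def pvEdgesA (n : Int) (vertices : List (Int × Int)) : List ((Int × Int) × (Int × Int)) :=
  (PySem.List.enumerate vertices 0).foldl (fun edges p1 =>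
    (PySem.List.enumerate vertices 0).foldl (fun edges p2 =>
      if p1.1 < p2.1 then
        let z2c := gaussian_conjugate p2.2
        let prod := gaussian_multiply p1.2 z2c
        if 0 < n ∧ PySem.Int.mod prod.1 n = 0 ∧ PySem.Int.mod prod.2 n = 0 then
          edges ++ [(p1.2, p2.2)]
        else edges
      else edges) edges) []

def build_photon_network (n : Int) : (List (Int × Int)) × (List ((Int × Int) × (Int × Int))) :=
  (pvVerticesA n, pvEdgesA n (pvVerticesA n))

-- ===== PORT B =====

def pvVerticesB (n : Int) : List (Int × Int) :=
  (PySem.List.pyRange 1 (pvIsqrt n + 1) 1).foldl (fun acc a =>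
    let b2 := n - a * a
    let b := pvIsqrt b2
    if b * b = b2 then acc ++ [(a, b)] else acc)
    (if n = 0 then [(0, 0)] else [])

def pvEdgesB (n : Int) (vertices : List (Int × Int)) : List ((Int × Int) × (Int × Int)) :=
  (PySem.List.enumerate vertices 0).foldl (fun acc p =>
    (PySem.List.slice vertices (some (p.1 + 1)) none).foldl (fun acc z2 =>
      if PySem.Int.mod (p.2.1 * z2.1 + p.2.2 * z2.2) n = 0 ∧
         PySem.Int.mod (p.2.2 * z2.1 - p.2.1 * z2.2) n = 0 then
        acc ++ [(p.2, z2)]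
      else acc) acc) []

def build_photon_network_alt (n : Int) : (List (Int × Int)) × (List ((Int × Int) × (Int × Int))) :=
  (pvVerticesB n, pvEdgesB n (pvVerticesB n))

-- ===== PRECONDITION & SPEC =====
-- math.isqrt raises ValueError for a negative argument, so A returns exactly on 0 ≤ n.
def Pre_build_photon_network (n : Int) : Prop := 0 ≤ n
instance (n : Int) : Decidable (Pre_build_photon_network n) := by unfold Pre_build_photon_network; infer_instance
def pvWitness_build_photon_network : Int := 5

def Spec_build_photon_network (n : Int) (out : (List (Int × Int)) × (List ((Int × Int) × (Int × Int)))) : Prop := out = build_photon_network_alt n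
instance (n : Int) (out : (List (Int × Int)) × (List ((Int × Int) × (Int × Int)))) : Decidable (Spec_build_photon_network n out) := by unfold Spec_build_photon_network; infer_instance

-- ===== CLAIM (what is proved, stated in full; the proofs are below) =====
def Claim_equal_build_photon_network : Prop := ∀ (n : Int), Dom_build_photon_network n → Pre_build_photon_network n → Spec_build_photon_network n (build_photon_network n)

-- ===== LEMMAS AND PROOFS =====

-- ---- integer square root facts ----

lemma pvIsqrt_nonneg (m : Int) : 0 ≤ pvIsqrt m := by
  simp [pvIsqrt]

lemma pvIsqrt_sq_le {m : Int} (hm : 0 ≤ m) : pvIsqrt m * pvIsqrt m ≤ m := by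
  have h := Nat.sqrt_le m.toNat
  have : ((Nat.sqrt m.toNat * Nat.sqrt m.toNat : Nat) : Int) ≤ (m.toNat : Int) := by exact_mod_cast h
  simpa [pvIsqrt, Int.toNat_of_nonneg hm] using this

lemma le_pvIsqrt_iff {x m : Int} (hx : 0 ≤ x) (hm : 0 ≤ m) : x ≤ pvIsqrt m ↔ x * x ≤ m := by
  constructor
  · intro h
    have h2 : x * x ≤ pvIsqrt m * pvIsqrt m :=
      mul_le_mul h h hx (pvIsqrt_nonneg m)
    exact le_trans h2 (pvIsqrt_sq_le hm)
  · intro h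
    have hnat : x.toNat * x.toNat ≤ m.toNat := by
      have hx' : (x.toNat : Int) = x := Int.toNat_of_nonneg hx
      have hm' : (m.toNat : Int) = m := Int.toNat_of_nonneg hm
      have : (x.toNat * x.toNat : Int) ≤ (m.toNat : Int) := by
        push_cast
        rw [hx', hm']
        exact h
      exact_mod_cast this
    have := (Nat.le_sqrt).mpr hnat
    have : (x.toNat : Int) ≤ (Nat.sqrt m.toNat : Int) := by exact_mod_cast this
    simpa [pvIsqrt, Int.toNat_of_nonneg hx] using this

lemma pvIsqrt_sq {x : Int} (hx : 0 ≤ x) : pvIsqrt (x * x) = x := by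
  have h1 : (x * x).toNat = x.toNat * x.toNat := by
    rcases Int.eq_ofNat_of_zero_le hx with ⟨k, rfl⟩
    exact_mod_cast rfl
  have h2 : Nat.sqrt (x.toNat * x.toNat) = x.toNat := by
    rw [← Nat.pow_two]; exact Nat.sqrt_eq' _
  simp [pvIsqrt, h1, h2, Int.toNat_of_nonneg hx]

lemma pv_abs_le_isqrt {a m : Int} (hm : 0 ≤ m) (h : a * a ≤ m) :
    -pvIsqrt m ≤ a ∧ a ≤ pvIsqrt m := by
  by_cases ha : 0 ≤ a
  · have := (le_pvIsqrt_iff ha hm).mpr h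
    constructor
    · have := pvIsqrt_nonneg m; omega
    · exact this
  · push_neg at ha
    have h' : (-a) * (-a) ≤ m := by nlinarith
    have := (le_pvIsqrt_iff (by omega) hm).mpr h'
    constructor
    · omega
    · have := pvIsqrt_nonneg m; omega

-- ---- lexicographic order on Int pairs (Python tuple order) ----

def pvLexLe (p q : Int × Int) : Prop := p.1 < q.1 ∨ (p.1 = q.1 ∧ p.2 ≤ q.2)
def pvLexLt (p q : Int × Int) : Prop := p.1 < q.1 ∨ (p.1 = q.1 ∧ p.2 < q.2)

def pvBef (a b : Int × Int) : Bool :=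
  decide (a.1 < b.1) || (!decide (b.1 < a.1) && decide (a.2 < b.2))

lemma pvBef_true_iff {a b : Int × Int} : pvBef a b = true ↔ pvLexLt a b := by
  simp [pvBef, pvLexLt]
  omega

lemma pvBef_false_le {a b : Int × Int} (h : pvBef a b = false) : pvLexLe b a := by
  simp [pvBef] at h
  unfold pvLexLe
  omega

lemma pvLexLt_le {a b : Int × Int} (h : pvLexLt a b) : pvLexLe a b := by
  unfold pvLexLt at h; unfold pvLexLe; omega

lemma pvLexLe_trans {a b c : Int × Int} (h1 : pvLexLe a b) (h2 : pvLexLe b c) : pvLexLe a c := by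
  unfold pvLexLe at *; omega

lemma pvLexLt_ne {a b : Int × Int} (h : pvLexLt a b) : a ≠ b := by
  intro he; subst he; unfold pvLexLt at h; omega

lemma pv_insert_pairwise (x : Int × Int) :
    ∀ (l : List (Int × Int)), l.Pairwise pvLexLe →
      (PySem.List.insertBy pvBef x l).Pairwise pvLexLe := by
  intro l
  induction l with
  | nil => intro _; simp [PySem.List.insertBy]
  | cons y ys ih =>
    intro hl
    rw [List.pairwise_cons] at hl
    obtain ⟨hy, hys⟩ := hl
    by_cases h : pvBef x y = true
    · rw [show PySem.List.insertBy pvBef x (y :: ys) = x :: y :: ys by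
        simp [PySem.List.insertBy, h]]
      refine List.Pairwise.cons ?_ (List.Pairwise.cons hy hys)
      intro z hz
      have hxy : pvLexLe x y := pvLexLt_le (pvBef_true_iff.mp h)
      rcases List.mem_cons.mp hz with rfl | hz'
      · exact hxy
      · exact pvLexLe_trans hxy (hy z hz')
    · rw [show PySem.List.insertBy pvBef x (y :: ys) = y :: PySem.List.insertBy pvBef x ys by
        simp [PySem.List.insertBy, h]]
      refine List.Pairwise.cons ?_ (ih hys)
      intro z hz
      rcases (PySem.List.mem_insertBy _ _ _ _).mp hz with rfl | hz'
      · exact pvBef_false_le (by simpa using h)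
      · exact hy z hz'

lemma pv_foldl_insert_pairwise :
    ∀ (xs acc : List (Int × Int)), acc.Pairwise pvLexLe →
      (xs.foldl (fun acc x => PySem.List.insertBy pvBef x acc) acc).Pairwise pvLexLe := by
  intro xs
  induction xs with
  | nil => intro acc h; simpa using h
  | cons x xs ih =>
    intro acc h
    exact ih _ (pv_insert_pairwise x acc h)

lemma pv_sorted2_eq {xs ys : List (Int × Int)} (hperm : ys.Perm xs)
    (hsort : ys.Pairwise pvLexLt) :
    PySem.List.sorted2 xs Prod.fst Prod.snd false = ys := by
  have hdef : PySem.List.sorted2 xs Prod.fst Prod.snd false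
      = xs.foldl (fun acc x => PySem.List.insertBy pvBef x acc) [] := rfl
  have hp1 : (PySem.List.sorted2 xs Prod.fst Prod.snd false).Pairwise pvLexLe := by
    rw [hdef]; exact pv_foldl_insert_pairwise xs [] (by simp)
  have hp2 : ys.Pairwise pvLexLe := hsort.imp pvLexLt_le
  have hperm' : (PySem.List.sorted2 xs Prod.fst Prod.snd false).Perm ys :=
    (PySem.List.sorted2_perm xs Prod.fst Prod.snd false).trans hperm.symm
  refine List.eq_of_perm_of_sorted ?_ hp1 hp2 hperm'
  intro a b _ _ h1 h2
  unfold pvLexLe at h1 h2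
  have : a.1 = b.1 ∧ a.2 = b.2 := by omega
  exact Prod.ext this.1 this.2

-- ---- normalize_gaussian classification ----

lemma normalize_q1 {a b : Int} (ha : 1 ≤ a) (hb : 0 ≤ b) :
    normalize_gaussian (a, b) = (a, b) := by
  simp only [normalize_gaussian, List.foldl]
  split_ifs <;> simp_all <;> try omega
  all_goals (split_ifs <;> simp_all <;> omega)

lemma normalize_q2 {a b : Int} (ha : a ≤ 0) (hb : 1 ≤ b) :
    normalize_gaussian (a, b) = (b, -a) := by
  simp only [normalize_gaussian, List.foldl]
  split_ifs <;> simp_all <;> try omega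
  all_goals (split_ifs <;> simp_all <;> omega)

lemma normalize_q3 {a b : Int} (ha : a ≤ -1) (hb : b ≤ 0) :
    normalize_gaussian (a, b) = (-a, -b) := by
  simp only [normalize_gaussian, List.foldl]
  split_ifs <;> simp_all <;> try omega
  all_goals (split_ifs <;> simp_all <;> omega)

lemma normalize_q4 {a b : Int} (ha : 0 ≤ a) (hb : b ≤ -1) :
    normalize_gaussian (a, b) = (-b, a) := by
  simp only [normalize_gaussian, List.foldl]
  split_ifs <;> simp_all <;> try omega
  all_goals (split_ifs <;> simp_all <;> omega)

-- ---- A's vertex list ----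

lemma pvAllZ_eq (n : Int) :
    pvAllZ n = (PySem.List.pyRange (-(pvIsqrt n) - 1) (pvIsqrt n + 2) 1).flatMap (fun a =>
      ((PySem.List.pyRange (-(pvIsqrt n) - 1) (pvIsqrt n + 2) 1).filter
        (fun b => decide (a * a + b * b = n))).map (fun b => (a, b))) := by
  have h := PySem.List.foldl_congr_mem
    (l := PySem.List.pyRange (-(pvIsqrt n) - 1) (pvIsqrt n + 2) 1)
    (f := fun acc a => (PySem.List.pyRange (-(pvIsqrt n) - 1) (pvIsqrt n + 2) 1).foldl
      (fun acc b => if a * a + b * b = n then acc ++ [(a, b)] else acc) acc)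
    (g := fun acc a => acc ++ ((PySem.List.pyRange (-(pvIsqrt n) - 1) (pvIsqrt n + 2) 1).filter
      (fun b => decide (a * a + b * b = n))).map (fun b => (a, b)))
    (init := [])
    (fun acc a _ => PySem.List.foldl_append_ite _ _ _ _)
  unfold pvAllZ
  rw [h, PySem.List.foldl_append_eq_flatMap, List.nil_append]

lemma mem_pvAllZ {n : Int} {z : Int × Int} :
    z ∈ pvAllZ n ↔ (-(pvIsqrt n) - 1 ≤ z.1 ∧ z.1 < pvIsqrt n + 2 ∧
      -(pvIsqrt n) - 1 ≤ z.2 ∧ z.2 < pvIsqrt n + 2 ∧ z.1 * z.1 + z.2 * z.2 = n) := by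
  rw [pvAllZ_eq]
  simp only [List.mem_flatMap, List.mem_map, List.mem_filter, PySem.List.mem_pyRange_one,
    decide_eq_true_eq]
  constructor
  · rintro ⟨a, ⟨ha1, ha2⟩, b, ⟨⟨hb1, hb2⟩, hab⟩, rfl⟩
    exact ⟨ha1, ha2, hb1, hb2, hab⟩
  · rintro ⟨h1, h2, h3, h4, h5⟩
    exact ⟨z.1, ⟨h1, h2⟩, z.2, ⟨⟨h3, h4⟩, h5⟩, rfl⟩

lemma pvNormalized_eq (n : Int) :
    pvNormalized n = PySem.Set.ofList ((pvAllZ n).map normalize_gaussian) := by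
  rw [PySem.Set.ofList_eq_foldl, List.foldl_map]
  rfl

lemma mem_pvNormalized {n : Int} {z : Int × Int} (hn : 0 ≤ n) :
    z ∈ pvNormalized n ↔ ∃ a b : Int, a * a + b * b = n ∧ normalize_gaussian (a, b) = z := by
  rw [pvNormalized_eq, PySem.Set.mem_ofList, List.mem_map]
  constructor
  · rintro ⟨w, hw, rfl⟩
    obtain ⟨_, _, _, _, hs⟩ := mem_pvAllZ.mp hw
    exact ⟨w.1, w.2, hs, rfl⟩
  · rintro ⟨a, b, hab, hz⟩
    refine ⟨(a, b), mem_pvAllZ.mpr ?_, hz⟩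
    have hb2 : 0 ≤ b * b := mul_self_nonneg b
    have ha2 : 0 ≤ a * a := mul_self_nonneg a
    have haa : a * a ≤ n := by linarith
    have hbb : b * b ≤ n := by linarith
    obtain ⟨ha1, ha2'⟩ := pv_abs_le_isqrt hn haa
    obtain ⟨hb1, hb2'⟩ := pv_abs_le_isqrt hn hbb
    exact ⟨by omega, by omega, by omega, by omega, hab⟩

-- ---- B's vertex list ----

lemma pvVerticesB_eq (n : Int) :
    pvVerticesB n = (if n = 0 then [((0 : Int), (0 : Int))] else []) ++
      ((PySem.List.pyRange 1 (pvIsqrt n + 1) 1).filter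
        (fun a => decide (pvIsqrt (n - a * a) * pvIsqrt (n - a * a) = n - a * a))).map
        (fun a => (a, pvIsqrt (n - a * a))) := by
  unfold pvVerticesB
  exact PySem.List.foldl_append_ite
    (fun a => pvIsqrt (n - a * a) * pvIsqrt (n - a * a) = n - a * a)
    (fun a => (a, pvIsqrt (n - a * a))) _ _

lemma mem_pvVerticesB {n : Int} {z : Int × Int} (hn : 0 ≤ n) :
    z ∈ pvVerticesB n ↔ ((n = 0 ∧ z = (0, 0)) ∨
      (1 ≤ z.1 ∧ 0 ≤ z.2 ∧ z.1 * z.1 + z.2 * z.2 = n)) := by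
  rw [pvVerticesB_eq]
  simp only [List.mem_append, List.mem_map, List.mem_filter, PySem.List.mem_pyRange_one,
    decide_eq_true_eq]
  constructor
  · rintro (hz | ⟨a, ⟨⟨ha1, ha2⟩, htest⟩, rfl⟩)
    · by_cases h0 : n = 0
      · simp [h0] at hz; exact Or.inl ⟨h0, hz⟩
      · simp [h0] at hz
    · refine Or.inr ⟨ha1, pvIsqrt_nonneg _, by linarith⟩
  · rintro (⟨h0, rfl⟩ | ⟨h1, h2, h3⟩)
    · exact Or.inl (by simp [h0])
    · right
      have hzz : z.1 * z.1 ≤ n := by nlinarith [mul_self_nonneg z.2]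
      have he : n - z.1 * z.1 = z.2 * z.2 := by linarith
      have hisq : pvIsqrt (n - z.1 * z.1) = z.2 := by rw [he]; exact pvIsqrt_sq h2
      refine ⟨z.1, ⟨⟨h1, ?_⟩, ?_⟩, ?_⟩
      · have := (le_pvIsqrt_iff (by omega) hn).mpr hzz
        omega
      · rw [hisq]
        linarith
      · rw [hisq]

lemma pvVerticesB_pairwise (n : Int) : (pvVerticesB n).Pairwise pvLexLt := by
  rw [pvVerticesB_eq]
  by_cases h0 : n = 0
  · subst h0
    have : pvIsqrt 0 + 1 = 1 := by decide
    rw [this, PySem.List.pyRange_one_eq_nil (by omega)]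
    simp
  · simp only [h0, if_false, List.nil_append]
    rw [List.pairwise_map]
    exact ((PySem.List.pairwise_lt_pyRange_one _ _).filter _).imp (fun h => Or.inl h)

lemma pvVerticesB_nodup (n : Int) : (pvVerticesB n).Nodup :=
  (pvVerticesB_pairwise n).imp pvLexLt_ne

-- ---- the two vertex lists agree ----

lemma mem_normalized_iff_vertsB {n : Int} {z : Int × Int} (hn : 0 ≤ n) :
    z ∈ pvNormalized n ↔ z ∈ pvVerticesB n := by
  rw [mem_pvNormalized hn, mem_pvVerticesB hn]
  constructor
  · rintro ⟨a, b, hab, rfl⟩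
    by_cases h0 : n = 0
    · have ha : a = 0 := by nlinarith [mul_self_nonneg a, mul_self_nonneg b]
      have hb : b = 0 := by nlinarith [mul_self_nonneg a, mul_self_nonneg b]
      subst ha; subst hb
      exact Or.inl ⟨h0, by decide⟩
    · rcases lt_trichotomy a 0 with ha | ha | ha <;> rcases lt_trichotomy b 0 with hb | hb | hb
      · rw [normalize_q3 (by omega) (by omega)]
        exact Or.inr ⟨by omega, by omega, by nlinarith⟩
      · rw [normalize_q3 (by omega) (by omega)]
        exact Or.inr ⟨by omega, by omega, by nlinarith⟩
      · rw [normalize_q2 (by omega) (by omega)]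
        exact Or.inr ⟨by omega, by omega, by nlinarith⟩
      · rw [normalize_q4 (by omega) (by omega)]
        exact Or.inr ⟨by omega, by omega, by nlinarith⟩
      · subst ha; subst hb
        simp only [mul_zero, zero_mul, add_zero] at hab
        exact absurd hab.symm h0
      · rw [normalize_q2 (by omega) (by omega)]
        exact Or.inr ⟨by omega, by omega, by nlinarith⟩
      · rw [normalize_q4 (by omega) (by omega)]
        exact Or.inr ⟨by omega, by omega, by nlinarith⟩
      · rw [normalize_q1 (by omega) (by omega)]
        exact Or.inr ⟨by omega, by omega, by nlinarith⟩
      · rw [normalize_q1 (by omega) (by omega)]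
        exact Or.inr ⟨by omega, by omega, by nlinarith⟩
  · rintro (⟨h0, rfl⟩ | ⟨h1, h2, h3⟩)
    · exact ⟨0, 0, by simpa using h0.symm, by decide⟩  -- n = 0 here
    · exact ⟨z.1, z.2, h3, by rw [normalize_q1 h1 h2]⟩

lemma pv_vertices_eq {n : Int} (hn : 0 ≤ n) : pvVerticesA n = pvVerticesB n := by
  unfold pvVerticesA
  have hnd : (pvNormalized n : List (Int × Int)).Nodup := by
    rw [pvNormalized_eq]; exact PySem.Set.nodup_ofList _
  refine pv_sorted2_eq ?_ (pvVerticesB_pairwise n)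
  refine (List.perm_ext_iff_of_nodup (pvVerticesB_nodup n) hnd).mpr ?_
  intro z
  exact (mem_normalized_iff_vertsB hn).symm

-- ---- edges ----

lemma pvEnumAll {β : Type} (P : (Int × Int) → Prop) [DecidablePred P]
    (F : (Int × Int) → β) (i : Int) :
    ∀ (xs : List (Int × Int)) (s : Int) (acc : List β), i < s →
      (PySem.List.enumerate xs s).foldl
        (fun acc q => if i < q.1 ∧ P q.2 then acc ++ [F q.2] else acc) acc
      = xs.foldl (fun acc z => if P z then acc ++ [F z] else acc) acc := by
  intro xs
  induction xs with
  | nil => intro s acc _; rfl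
  | cons x xs ih =>
    intro s acc hs
    rw [PySem.List.enumerate_cons]
    simp only [List.foldl_cons]
    by_cases hP : P x
    · rw [if_pos ⟨hs, hP⟩, if_pos hP]
      exact ih (s + 1) _ (by omega)
    · rw [if_neg (by tauto), if_neg hP]
      exact ih (s + 1) _ (by omega)

lemma pvEnumDrop {β : Type} (P : (Int × Int) → Prop) [DecidablePred P]
    (F : (Int × Int) → β) (i : Int) :
    ∀ (xs : List (Int × Int)) (s : Int) (acc : List β), s ≤ i + 1 →
      (PySem.List.enumerate xs s).foldl
        (fun acc q => if i < q.1 ∧ P q.2 then acc ++ [F q.2] else acc) acc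
      = (xs.drop (i + 1 - s).toNat).foldl
          (fun acc z => if P z then acc ++ [F z] else acc) acc := by
  intro xs
  induction xs with
  | nil => intro s acc _; simp
  | cons x xs ih =>
    intro s acc hs
    rw [PySem.List.enumerate_cons]
    simp only [List.foldl_cons]
    by_cases hsi : s ≤ i
    · rw [if_neg (by intro h; omega)]
      have hk : (i + 1 - s).toNat = (i + 1 - (s + 1)).toNat + 1 := by omega
      rw [hk, List.drop_succ_cons]
      exact ih (s + 1) _ (by omega)
    · have hse : s = i + 1 := by omega
      have hk : (i + 1 - s).toNat = 0 := by omega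
      rw [hk, List.drop_zero]
      simp only [List.foldl_cons]
      by_cases hP : P x
      · rw [if_pos ⟨by omega, hP⟩, if_pos hP]
        exact pvEnumAll P F i xs (s + 1) _ (by omega)
      · rw [if_neg (by tauto), if_neg hP]
        exact pvEnumAll P F i xs (s + 1) _ (by omega)

lemma pv_edges_eq {n : Int} (hpos : 0 < n) (V : List (Int × Int)) :
    pvEdgesA n V = pvEdgesB n V := by
  unfold pvEdgesA pvEdgesB
  refine PySem.List.foldl_congr_mem _ _ _ _ ?_
  intro acc p hp
  have hp1 : 0 ≤ p.1 := by
    obtain ⟨k, hk, he⟩ := (PySem.List.mem_enumerate_iff _ _ _).mp hp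
    rw [he]; simp
  rw [PySem.List.slice_from V (show (0:Int) ≤ p.1 + 1 by omega)]
  have hbody : ∀ (e : List ((Int × Int) × (Int × Int))) (q : Int × (Int × Int)),
      q ∈ PySem.List.enumerate V 0 →
      (if p.1 < q.1 then
        (if 0 < n ∧ PySem.Int.mod (gaussian_multiply p.2 (gaussian_conjugate q.2)).1 n = 0 ∧
            PySem.Int.mod (gaussian_multiply p.2 (gaussian_conjugate q.2)).2 n = 0 then
          e ++ [(p.2, q.2)]
        else e)
      else e)
      = (if p.1 < q.1 ∧ ((fun z : Int × Int =>
            PySem.Int.mod (p.2.1 * z.1 + p.2.2 * z.2) n = 0 ∧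
            PySem.Int.mod (p.2.2 * z.1 - p.2.1 * z.2) n = 0) q.2)
          then e ++ [((fun z : Int × Int => (p.2, z)) q.2)] else e) := by
    intro e q _
    by_cases h1 : p.1 < q.1
    · simp only [gaussian_multiply, gaussian_conjugate, if_pos h1]
      have e1 : p.2.1 * q.2.1 - p.2.2 * -q.2.2 = p.2.1 * q.2.1 + p.2.2 * q.2.2 := by ring
      have e2 : p.2.1 * -q.2.2 + p.2.2 * q.2.1 = p.2.2 * q.2.1 - p.2.1 * q.2.2 := by ring
      simp only [e1, e2]
      simp [hpos, h1]
    · simp only [if_neg h1]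
      rw [if_neg (by tauto)]
  refine (PySem.List.foldl_congr_mem _ _ _ _ hbody).trans ?_
  refine Eq.trans (pvEnumDrop
      (fun z : Int × Int =>
        PySem.Int.mod (p.2.1 * z.1 + p.2.2 * z.2) n = 0 ∧
        PySem.Int.mod (p.2.2 * z.1 - p.2.1 * z.2) n = 0)
      (fun z : Int × Int => (p.2, z))
      p.1 V 0 acc (by omega)) ?_
  simp only [sub_zero]

-- ===== VERDICT (by name: the statement is the Claim_ definition above) =====
theorem build_photon_network_spec : Claim_equal_build_photon_network := by
  intro n hdom hpre
  unfold Spec_build_photon_network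
  by_cases hn0 : n = 0
  · subst hn0; decide
  · have hpos : 0 < n := lt_of_le_of_ne hpre (Ne.symm hn0)
    show (pvVerticesA n, pvEdgesA n (pvVerticesA n)) = (pvVerticesB n, pvEdgesB n (pvVerticesB n))
    rw [pv_vertices_eq hpre, pv_edges_eq hpos]
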